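-- pv_equiv track=rewrite | github.com/svigneau/code-to-module | src/code_to_module/generate.py | _combine_flags
-- ===== SOURCE A (Python) =====
-- def _combine_flags(tokens: list[str]) -> list[str]:
--     """Pair -flag value tokens into single strings."""
--     result: list[str] = []
--     i = 0
--     while i < len(tokens):
--         tok = tokens[i]
--         if tok.startswith("-") and i + 1 < len(tokens):
--             nxt = tokens[i + 1]
--             # Pair flag with its value if value is not itself a flag
--             if not nxt.startswith("-"):
--                 result.append(f"{tok} {nxt}")
--                 i += 2
--                 continue
--         result.append(tok)
--         i += 1
--     return result
-- ===== SOURCE B (Python) =====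
-- def _combine_flags(tokens: list[str]) -> list[str]:
--     """Pair -flag value tokens into single strings."""
--     result: list[str] = []
--     pending = None
--     for tok in tokens:
--         if pending is not None:
--             if tok.startswith("-"):
--                 result.append(pending)
--                 pending = tok
--             else:
--                 result.append(f"{pending} {tok}")
--                 pending = None
--         elif tok.startswith("-"):
--             pending = tok
--         else:
--             result.append(tok)
--     if pending is not None:
--         result.append(pending)
--     return result
-- ===== Notes on version B (the rewrite author's own statement) =====
-- stated objective: simpler
-- what changed: Replaced the index-based while loop with i/i+1 lookahead and i+=2 skips by a single for-loop state machine that carries a `pending` flag and flushes it after the loop.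
import Mathlib
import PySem

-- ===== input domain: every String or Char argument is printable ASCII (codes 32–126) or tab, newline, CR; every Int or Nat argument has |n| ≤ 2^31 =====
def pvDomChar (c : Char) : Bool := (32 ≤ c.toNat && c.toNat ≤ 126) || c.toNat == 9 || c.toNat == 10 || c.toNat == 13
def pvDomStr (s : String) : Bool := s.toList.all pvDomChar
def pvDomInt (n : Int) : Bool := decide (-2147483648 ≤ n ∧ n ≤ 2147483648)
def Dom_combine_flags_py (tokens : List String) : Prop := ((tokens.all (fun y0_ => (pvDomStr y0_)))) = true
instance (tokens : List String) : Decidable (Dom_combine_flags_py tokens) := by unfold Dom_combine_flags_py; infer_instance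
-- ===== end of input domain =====

-- B replaces A's index-with-lookahead while loop by a single pass carrying a `pending` flag (simpler decomposition; same cost).

-- ===== PORT A =====
-- A's while loop over index i; terminates since tokens.length - i decreases.
def combine_flags_A_go (tokens : List String) (i : Nat) (result : List String) : List String :=
  if h : i < tokens.length then
    let tok := tokens[i]
    if PySem.Str.startswith tok "-" && decide (i + 1 < tokens.length) then
      let nxt := tokens.getD (i + 1) ""
      if ¬ (PySem.Str.startswith nxt "-" = true) then
        combine_flags_A_go tokens (i + 2) (result ++ [tok ++ " " ++ nxt])
      else
        combine_flags_A_go tokens (i + 1) (result ++ [tok])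
    else
      combine_flags_A_go tokens (i + 1) (result ++ [tok])
  else
    result
termination_by tokens.length - i
decreasing_by all_goals omega

def combine_flags_py (tokens : List String) : List String :=
  combine_flags_A_go tokens 0 []

-- ===== PORT B =====
-- B's for loop: state = (pending : Option String, result accumulator).
def combine_flags_B_go (pending : Option String) (toks : List String) (result : List String) : List String :=
  match toks with
  | [] =>
    match pending with
    | some p => result ++ [p]
    | none => result
  | tok :: rest =>
    match pending with
    | some p =>
      if PySem.Str.startswith tok "-" then
        combine_flags_B_go (some tok) rest (result ++ [p])
      else
        combine_flags_B_go none rest (result ++ [p ++ " " ++ tok])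
    | none =>
      if PySem.Str.startswith tok "-" then
        combine_flags_B_go (some tok) rest result
      else
        combine_flags_B_go none rest (result ++ [tok])

def combine_flags_py_alt (tokens : List String) : List String :=
  combine_flags_B_go none tokens []

-- ===== PRECONDITION & SPEC =====
def Spec_combine_flags_py (tokens : List String) (out : List String) : Prop := out = combine_flags_py_alt tokens
instance (tokens : List String) (out : List String) : Decidable (Spec_combine_flags_py tokens out) := by unfold Spec_combine_flags_py; infer_instance

-- ===== CLAIM (what is proved, stated in full; the proofs are below) =====
def Claim_equal_combine_flags_py : Prop := ∀ (tokens : List String), Dom_combine_flags_py tokens → Spec_combine_flags_py tokens (combine_flags_py tokens)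

-- ===== LEMMAS AND PROOFS =====

-- List-structural reformulation of A's index loop (proof-only helper).
def combine_flags_L : List String → List String → List String
  | [], result => result
  | [tok], result => result ++ [tok]
  | tok :: nxt :: rest2, result =>
    if PySem.Str.startswith tok "-" then
      if ¬ (PySem.Str.startswith nxt "-" = true) then
        combine_flags_L rest2 (result ++ [tok ++ " " ++ nxt])
      else
        combine_flags_L (nxt :: rest2) (result ++ [tok])
    else
      combine_flags_L (nxt :: rest2) (result ++ [tok])

theorem A_go_eq_L (tokens : List String) (i : Nat) (result : List String) :
    combine_flags_A_go tokens i result = combine_flags_L (tokens.drop i) result := by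
  induction hn : tokens.length - i using Nat.strong_induction_on generalizing i result with
  | _ n ih =>
    rw [combine_flags_A_go]
    by_cases h : i < tokens.length
    · have hd : tokens.drop i = tokens[i] :: tokens.drop (i + 1) :=
        List.drop_eq_getElem_cons h
      rw [dif_pos h]
      by_cases h2 : i + 1 < tokens.length
      · have hd2 : tokens.drop (i + 1) = tokens[i + 1] :: tokens.drop (i + 2) :=
          List.drop_eq_getElem_cons h2
        have hgd : tokens.getD (i + 1) "" = tokens[i + 1] := List.getD_eq_getElem _ _ h2
        by_cases hf : PySem.Str.startswith tokens[i] "-" = true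
        · rw [if_pos (by rw [Bool.and_eq_true, decide_eq_true_eq]; exact ⟨hf, h2⟩), hgd]
          by_cases hnf : PySem.Str.startswith tokens[i + 1] "-" = true
          · rw [if_neg (not_not_intro hnf),
              ih (tokens.length - (i + 1)) (by omega) (i + 1) _ rfl, hd, hd2]
            simp only [combine_flags_L]
            rw [if_pos hf, if_neg (not_not_intro hnf), ← hd2]
          · rw [if_pos hnf,
              ih (tokens.length - (i + 2)) (by omega) (i + 2) _ rfl, hd, hd2]
            simp only [combine_flags_L]
            rw [if_pos hf, if_pos hnf]
        · rw [if_neg (by rw [Bool.and_eq_true]; exact fun hc => hf hc.1),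
            ih (tokens.length - (i + 1)) (by omega) (i + 1) _ rfl, hd, hd2]
          simp only [combine_flags_L]
          rw [if_neg hf, ← hd2]
      · have hd2 : tokens.drop (i + 1) = [] := by
          apply List.drop_eq_nil_of_le; omega
        rw [if_neg (by rw [Bool.and_eq_true, decide_eq_true_eq]; exact fun hc => h2 hc.2),
          ih (tokens.length - (i + 1)) (by omega) (i + 1) _ rfl, hd, hd2]
        simp only [combine_flags_L]
    · have hd : tokens.drop i = [] := by
        apply List.drop_eq_nil_of_le; omega
      rw [dif_neg h, hd]
      simp only [combine_flags_L]

-- B's state machine equals the list reformulation of A; the none- and pending-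
-- cases are proved together by strong induction on the list length.
theorem B_eq_L (toks : List String) (result : List String) :
    combine_flags_B_go none toks result = combine_flags_L toks result ∧
    ∀ p, PySem.Str.startswith p "-" = true →
      combine_flags_B_go (some p) toks result = combine_flags_L (p :: toks) result := by
  induction hn : toks.length using Nat.strong_induction_on generalizing toks result with
  | _ n ih =>
    constructor
    · match toks with
      | [] => rw [combine_flags_B_go]; simp only [combine_flags_L]
      | tok :: rest =>
        rw [combine_flags_B_go]
        by_cases hf : PySem.Str.startswith tok "-" = true
        · rw [if_pos hf]
          exact (ih rest.length (by simp [← hn]) rest result rfl).2 tok hf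
        · rw [if_neg hf, (ih rest.length (by simp [← hn]) rest (result ++ [tok]) rfl).1]
          match rest with
          | [] => simp only [combine_flags_L]
          | nxt :: rest2 =>
            conv_rhs => simp only [combine_flags_L]
            rw [if_neg hf]
    · intro p hp
      match toks with
      | [] => rw [combine_flags_B_go]; simp only [combine_flags_L]
      | tok :: rest =>
        rw [combine_flags_B_go]
        by_cases hf : PySem.Str.startswith tok "-" = true
        · rw [if_pos hf,
            (ih rest.length (by simp [← hn]) rest (result ++ [p]) rfl).2 tok hf]
          conv_rhs => simp only [combine_flags_L]
          split_ifs <;> simp_all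
        · rw [if_neg hf,
            (ih rest.length (by simp [← hn]) rest (result ++ [p ++ " " ++ tok]) rfl).1]
          conv_rhs => simp only [combine_flags_L]
          split_ifs <;> simp_all

-- ===== VERDICT (by name: the statement is the Claim_ definition above) =====
theorem combine_flags_py_spec : Claim_equal_combine_flags_py := by
  intro tokens _
  unfold Spec_combine_flags_py combine_flags_py combine_flags_py_alt
  rw [A_go_eq_L, (B_eq_L tokens []).1, List.drop_zero]
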